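-- pv_equiv track=rewrite | github.com/Gooddwarf42/advent-of-code-2025 | day02.py | is_repetition
-- ===== SOURCE A (Python) =====
-- def is_repetition(prefix: int, number: int) -> bool:
--     length = len(str(number))
--     prefix_length = len(str(prefix))
--     if length % prefix_length != 0:
--         return False
--
--     repetitions = length // prefix_length
--
--     i = 0
--     appendage = 0
--     while i < repetitions:
--         # add the last prefix_length digits to our partial result
--         appendage = appendage + (prefix * 10 ** (i * prefix_length))
--
--         # ensure the first i * prefix_length digits match
--         if appendage != number % (10 ** (prefix_length * (i + 1))):
--             return False
--
--         i = i + 1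
--
--     return True
-- ===== SOURCE B (Python) =====
-- def is_repetition(prefix: int, number: int) -> bool:
--     prefix_length = len(str(prefix))
--     length = len(str(number))
--     if length % prefix_length != 0:
--         return False
--     mod = 10 ** prefix_length
--     for _ in range(length // prefix_length):
--         if number % mod != prefix:
--             return False
--         number //= mod
--     return True
-- ===== Notes on version B (the rewrite author's own statement) =====
-- stated objective: simpler
-- what changed: B strips the lowest prefix-length digit chunk from a shrinking remainder each step (one fixed modulus, number //= mod) and compares the chunk to prefix, instead of A's cumulative reconstruction of the number checked against a growing modulus with per-step power computations.
import Mathlib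
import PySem

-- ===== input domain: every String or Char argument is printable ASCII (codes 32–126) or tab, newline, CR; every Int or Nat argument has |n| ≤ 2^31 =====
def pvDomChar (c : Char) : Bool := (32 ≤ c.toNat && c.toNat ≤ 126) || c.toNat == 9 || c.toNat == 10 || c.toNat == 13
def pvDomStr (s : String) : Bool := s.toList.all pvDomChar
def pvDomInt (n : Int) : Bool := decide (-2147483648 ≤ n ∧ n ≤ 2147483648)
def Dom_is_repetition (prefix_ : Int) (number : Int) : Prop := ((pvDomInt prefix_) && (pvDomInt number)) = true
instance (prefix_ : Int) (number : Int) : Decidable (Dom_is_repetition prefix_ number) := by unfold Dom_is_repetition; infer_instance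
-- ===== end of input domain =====

-- B replaces A's cumulative reconstruction of the number (growing modulus) by stripping one
-- fixed-size low chunk per step from a shrinking remainder; objective: simpler.

-- ===== PORT A =====
-- while-loop of A as fuel recursion; j is the loop counter i (always ≥ 0, kept as Nat),
-- app the running 'appendage'.  Exponents i*prefix_length are ≥ 0 in every reachable state,
-- so '10 ** e' is ported exactly as '10 ^ e.toNat'.
def isRepLoopA (prefix_ number pl : Int) : Nat → Nat → Int → Bool
  | 0, _, _ => true
  | k+1, j, app =>
    let app2 := app + prefix_ * 10 ^ ((j : Int) * pl).toNat
    if app2 ≠ PySem.Int.mod number (10 ^ (pl * ((j : Int) + 1)).toNat) then false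
    else isRepLoopA prefix_ number pl k (j+1) app2

def is_repetition (prefix_ : Int) (number : Int) : Bool :=
  let length := PySem.Str.len (PySem.Int.toStr number)
  let prefix_length := PySem.Str.len (PySem.Int.toStr prefix_)
  if PySem.Int.mod length prefix_length ≠ 0 then false
  else
    let repetitions := PySem.Int.floordiv length prefix_length
    isRepLoopA prefix_ number prefix_length repetitions.toNat 0 0

-- ===== PORT B =====
-- the for-loop of B: each step compares the low chunk 'number % mod' to prefix and strips it.
def isRepLoopB (prefix_ mod : Int) : Nat → Int → Bool
  | 0, _ => true
  | k+1, n =>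
    if PySem.Int.mod n mod ≠ prefix_ then false
    else isRepLoopB prefix_ mod k (PySem.Int.floordiv n mod)

def is_repetition_alt (prefix_ : Int) (number : Int) : Bool :=
  let prefix_length := PySem.Str.len (PySem.Int.toStr prefix_)
  let length := PySem.Str.len (PySem.Int.toStr number)
  if PySem.Int.mod length prefix_length ≠ 0 then false
  else
    let mod := (10 : Int) ^ prefix_length.toNat
    isRepLoopB prefix_ mod (PySem.Int.floordiv length prefix_length).toNat number

-- ===== PRECONDITION & SPEC =====
def Spec_is_repetition (prefix_ : Int) (number : Int) (out : Bool) : Prop := out = is_repetition_alt prefix_ number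
instance (prefix_ : Int) (number : Int) (out : Bool) : Decidable (Spec_is_repetition prefix_ number out) := by unfold Spec_is_repetition; infer_instance

-- ===== CLAIM (what is proved, stated in full; the proofs are below) =====
def Claim_equal_is_repetition : Prop := ∀ (prefix_ : Int) (number : Int), Dom_is_repetition prefix_ number → Spec_is_repetition prefix_ number (is_repetition prefix_ number)

-- ===== LEMMAS AND PROOFS =====

-- floor div/mod with positive divisors: n % (a*b) splits into low part and middle chunk
lemma emod_mul_decompose (n a b : Int) (ha : 0 < a) :
    n % (a * b) = n % a + a * ((n / a) % b) := by
  have h1 : n % a = n - a * (n / a) := Int.emod_def n a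
  have h2 : (n / a) % b = n / a - b * (n / a / b) := Int.emod_def _ b
  have h3 : n / a / b = n / (a * b) := Int.ediv_ediv_of_nonneg (le_of_lt ha)
  have h4 : n % (a * b) = n - a * b * (n / (a * b)) := Int.emod_def n (a * b)
  rw [h1, h2, h3, h4]; ring

lemma loopA_eq_loopB (prefix_ n : Int) (p : Nat) :
    ∀ (k j : Nat) (app : Int), app = PySem.Int.mod n (10 ^ (p * j)) →
      isRepLoopA prefix_ n (p : Int) k j app
        = isRepLoopB prefix_ ((10 : Int) ^ p) k (PySem.Int.floordiv n (10 ^ (p * j))) := by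
  intro k
  induction k with
  | zero => intro j app _; rfl
  | succ k ih =>
    intro j app happ
    have hPa : (0 : Int) < 10 ^ (p * j) := by positivity
    have hM : (0 : Int) < 10 ^ p := by positivity
    have hmodP := PySem.Int.mod_eq_emod_of_pos (a := n) hPa
    have hdivP := PySem.Int.floordiv_eq_ediv_of_pos (a := n) hPa
    have hexp1 : ((j : Int) * (p : Int)).toNat = p * j := by
      rw [← Nat.cast_mul, Int.toNat_natCast, Nat.mul_comm]
    have hexp2 : ((p : Int) * ((j : Int) + 1)).toNat = p * (j + 1) := by
      rw [show ((p : Int) * ((j : Int) + 1)) = ((p * (j + 1) : Nat) : Int) by push_cast; ring,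
        Int.toNat_natCast]
    have hsplit : 10 ^ (p * (j + 1)) = (10 : Int) ^ (p * j) * 10 ^ p := by
      rw [← pow_add]; ring_nf
    have hPM : (0 : Int) < 10 ^ (p * j) * 10 ^ p := by positivity
    have hmodPM := PySem.Int.mod_eq_emod_of_pos (a := n) hPM
    have hmodB := PySem.Int.mod_eq_emod_of_pos (a := PySem.Int.floordiv n (10 ^ (p * j))) hM
    have hdec := emod_mul_decompose n (10 ^ (p * j)) (10 ^ p) hPa
    -- the two step conditions are equivalent
    have hcond : (app + prefix_ * 10 ^ ((j : Int) * (p : Int)).toNat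
          = PySem.Int.mod n (10 ^ ((p : Int) * ((j : Int) + 1)).toNat))
        ↔ (PySem.Int.mod (PySem.Int.floordiv n (10 ^ (p * j))) ((10 : Int) ^ p) = prefix_) := by
      rw [hexp1, hexp2, happ, hmodP, hmodB, hdivP]
      have : PySem.Int.mod n (10 ^ (p * (j + 1))) = n % (10 ^ (p * j) * 10 ^ p) := by
        rw [hsplit] at *; exact PySem.Int.mod_eq_emod_of_pos (a := n) hPM
      rw [this, hdec]
      constructor
      · intro h
        have := add_left_cancel h
        have h2 : prefix_ = (n / 10 ^ (p * j)) % 10 ^ p := by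
          have := mul_left_cancel₀ (ne_of_gt hPa) (by linarith [this] : 10 ^ (p * j) * prefix_ = 10 ^ (p * j) * ((n / 10 ^ (p * j)) % 10 ^ p))
          exact this
        omega
      · intro h; rw [h]; ring
    simp only [isRepLoopA, isRepLoopB]
    by_cases hc : app + prefix_ * 10 ^ ((j : Int) * (p : Int)).toNat
        = PySem.Int.mod n (10 ^ ((p : Int) * ((j : Int) + 1)).toNat)
    · have hc' : PySem.Int.mod (PySem.Int.floordiv n (10 ^ (p * j))) ((10 : Int) ^ p) = prefix_ :=
        hcond.mp hc
      rw [if_neg (by simpa using hc), if_neg (by simpa using hc')]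
      have hnext : app + prefix_ * 10 ^ ((j : Int) * (p : Int)).toNat
          = PySem.Int.mod n (10 ^ (p * (j + 1))) := by
        rw [hc, hexp2]
      have hdivNext : PySem.Int.floordiv (PySem.Int.floordiv n (10 ^ (p * j))) ((10 : Int) ^ p)
          = PySem.Int.floordiv n (10 ^ (p * (j + 1))) := by
        rw [PySem.Int.floordiv_eq_ediv_of_pos (a := PySem.Int.floordiv n (10 ^ (p * j))) hM,
            PySem.Int.floordiv_eq_ediv_of_pos (a := n) (by positivity : (0:Int) < 10 ^ (p * (j+1))),
            hdivP, hsplit, Int.ediv_ediv_of_nonneg (le_of_lt hPa)]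
      rw [hdivNext] at *
      exact ih (j + 1) _ hnext
    · have hc' : ¬ PySem.Int.mod (PySem.Int.floordiv n (10 ^ (p * j))) ((10 : Int) ^ p) = prefix_ :=
        fun h => hc (hcond.mpr h)
      rw [if_pos (by simpa using hc), if_pos (by simpa using hc')]

-- ===== VERDICT (by name: the statement is the Claim_ definition above) =====
theorem is_repetition_spec : Claim_equal_is_repetition := by
  intro prefix_ number _
  unfold Spec_is_repetition is_repetition is_repetition_alt
  set pl := PySem.Str.len (PySem.Int.toStr prefix_) with hpl
  set L := PySem.Str.len (PySem.Int.toStr number) with hL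
  by_cases hg : PySem.Int.mod L pl ≠ 0
  · simp [hg]
  · simp only [hg]
    have hp : pl = ((PySem.Int.toStr prefix_).length : Int) := by
      simp [hpl, PySem.Str.len_eq]
      rw [← PySem.Int.toList_toStr, String.length_toList]
    have hpt : pl.toNat = (PySem.Int.toStr prefix_).length := by rw [hp]; simp
    have := loopA_eq_loopB prefix_ number (PySem.Int.toStr prefix_).length
      (PySem.Int.floordiv L pl).toNat 0 0 (by simp)
    simp only [Nat.mul_zero, pow_zero] at this
    rw [PySem.Int.floordiv_eq_ediv_of_pos (a := number) (by norm_num : (0:Int) < 1), Int.ediv_one] at this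
    simp [← hp, hpt] at this ⊢
    rw [hp] at this ⊢
    exact this
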